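-- pv_equiv track=rewrite | github.com/SFDO-Tooling/CumulusCI | cumulusci/tasks/bulkdata/dataset_utils/post_processes.py | _index_by_sobject
-- ===== SOURCE A (Python) =====
-- from typing import NamedTuple
--
-- class MappingIndex(NamedTuple):  # info needed by the algorithm above
--     first_instance: int  # where was the first time this sobj was referenced?
--     last_step_name: str  # where was the last (so far)?
--
-- def _index_by_sobject(mappings):
--     indexed_by_sobject = {}
--     for idx, (mapping_name, mapping) in enumerate(mappings.items()):
--         # make an index of the order of objects
--         sobject = mapping["sf_object"]
--         existing_index = indexed_by_sobject.get(sobject)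
--
--         if existing_index:
--             new_mi = MappingIndex(existing_index.first_instance, mapping_name)
--         else:
--             new_mi = MappingIndex(idx, mapping_name)
--         indexed_by_sobject[sobject] = new_mi
--
--     return indexed_by_sobject
-- ===== SOURCE B (Python) =====
-- from typing import NamedTuple
--
-- class MappingIndex(NamedTuple):
--     first_instance: int
--     last_step_name: str
--
-- def _index_by_sobject(mappings):
--     names = list(mappings)
--     sobjs = [m["sf_object"] for m in mappings.values()]
--     n = len(sobjs)
--     return {
--         so: MappingIndex(sobjs.index(so), names[n - 1 - sobjs[::-1].index(so)])
--         for so in dict.fromkeys(sobjs)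
--     }
-- ===== Notes on version B (the rewrite author's own statement) =====
-- stated objective: alternative
-- what changed: Replaces A's single-pass dict of records with incremental updates by a staged computation: extract the name and sobject columns, dedup the sobject column (dict.fromkeys), and build each entry directly with positional scans - first index via list.index and last name via index into the reversed column.
import Mathlib
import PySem

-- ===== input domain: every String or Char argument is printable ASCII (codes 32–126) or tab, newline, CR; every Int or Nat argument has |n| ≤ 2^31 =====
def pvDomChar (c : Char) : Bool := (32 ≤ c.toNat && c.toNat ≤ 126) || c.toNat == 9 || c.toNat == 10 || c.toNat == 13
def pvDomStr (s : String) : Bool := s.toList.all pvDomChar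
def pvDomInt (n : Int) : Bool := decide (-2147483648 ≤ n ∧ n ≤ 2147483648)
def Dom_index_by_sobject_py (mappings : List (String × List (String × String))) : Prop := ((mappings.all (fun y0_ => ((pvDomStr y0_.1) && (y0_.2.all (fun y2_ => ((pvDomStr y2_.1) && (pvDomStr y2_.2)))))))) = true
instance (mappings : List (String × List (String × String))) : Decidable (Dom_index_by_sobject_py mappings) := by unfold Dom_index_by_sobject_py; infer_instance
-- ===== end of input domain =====

-- B replaces A's one-pass dict of records (existing/else branch, incremental overwrite) by a
-- staged computation on the name and sobject columns: dedup the sobject column, then build each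
-- entry by positional scans (first index via list.index, last name via index into the reversed
-- column); equal return value on Pre_ (proved below), same asymptotic cost not claimed.

-- ===== PORT A =====
-- mapping["sf_object"] (both Pythons do this lookup identically): `.getD ""` is never reached
-- on Pre_ inputs — Python raises KeyError exactly there, excluded by Pre_.
def soOf (p : String × List (String × String)) : String :=
  ((PySem.Dict.ofList p.2).get? "sf_object").getD ""

-- enumerate(mappings.items()) is ported as a foldl carrying the running index in the state.
def stepA_index (st : PySem.Dict String (Int × String) × Int)
    (p : String × List (String × String)) : PySem.Dict String (Int × String) × Int :=
  -- existing_index is a 2-field NamedTuple, hence truthy exactly when the key is present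
  match st.1.get? (soOf p) with
  | some mi => (st.1.insert (soOf p) (mi.1, p.1), st.2 + 1)
  | none    => (st.1.insert (soOf p) (st.2, p.1), st.2 + 1)

def index_by_sobject_py (mappings : List (String × List (String × String))) :
    List (String × Int × String) :=
  (mappings.foldl stepA_index (PySem.Dict.empty, 0)).1.items

-- ===== PORT B =====
-- names = list(mappings); sobjs = [m["sf_object"] for m in mappings.values()];
-- dict.fromkeys(sobjs) is PySem.List.dedup; sobjs[::-1] is reverse (PySem.List.slice?_none_none_neg_one);
-- sobjs.index(so) always succeeds (so drawn from dedup sobjs) and names[n-1-…] is always in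
-- range, so the two `.getD` fallbacks are never reached.
def index_by_sobject_py_alt (mappings : List (String × List (String × String))) :
    List (String × Int × String) :=
  let names := mappings.map Prod.fst
  let sobjs := mappings.map soOf
  let n : Int := sobjs.length
  (PySem.List.dedup sobjs).map (fun so =>
    (so, (((PySem.List.index? sobjs so).getD 0 : Nat) : Int),
         (PySem.List.pyGet? names
            (n - 1 - (((PySem.List.index? sobjs.reverse so).getD 0 : Nat) : Int))).getD ""))

-- ===== PRECONDITION & SPEC =====
-- Pre_ excludes (a) inputs where some mapping lacks the "sf_object" key — Python A raises
-- KeyError there — and (b) association lists with duplicate outer keys, which do not denote a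
-- well-formed Python dict (dict construction would collapse them).
def Pre_index_by_sobject_py (mappings : List (String × List (String × String))) : Prop :=
  (mappings.map Prod.fst).Nodup ∧ ∀ p ∈ mappings, "sf_object" ∈ p.2.map Prod.fst
instance (mappings : List (String × List (String × String))) : Decidable (Pre_index_by_sobject_py mappings) := by unfold Pre_index_by_sobject_py; infer_instance

def pvWitness_index_by_sobject_py : (List (String × List (String × String))) :=
  [("Insert Account", [("sf_object", "Account")]),
   ("Insert Contact", [("sf_object", "Contact")]),
   ("Update Account", [("sf_object", "Account")])]

def Spec_index_by_sobject_py (mappings : List (String × List (String × String))) (out : List (String × Int × String)) : Prop := out = index_by_sobject_py_alt mappings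
instance (mappings : List (String × List (String × String))) (out : List (String × Int × String)) : Decidable (Spec_index_by_sobject_py mappings out) := by unfold Spec_index_by_sobject_py; infer_instance

-- ===== CLAIM (what is proved, stated in full; the proofs are below) =====
def Claim_equal_index_by_sobject_py : Prop := ∀ (mappings : List (String × List (String × String))), Dom_index_by_sobject_py mappings → Pre_index_by_sobject_py mappings → Spec_index_by_sobject_py mappings (index_by_sobject_py mappings)

-- ===== LEMMAS AND PROOFS =====

def entryFor (S N : List String) (so : String) : String × Int × String :=
  (so, (((PySem.List.index? S so).getD 0 : Nat) : Int),
       (PySem.List.pyGet? N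
          ((S.length : Int) - 1 - (((PySem.List.index? S.reverse so).getD 0 : Nat) : Int))).getD "")

theorem entryFor_stable (S N : List String) (s nm so : String)
    (hlen : S.length = N.length) (hso : so ∈ S) (hne : so ≠ s) :
    entryFor (S ++ [s]) (N ++ [nm]) so = entryFor S N so := by
  have hrev : so ∈ S.reverse := List.mem_reverse.mpr hso
  obtain ⟨j, hj⟩ := Option.isSome_iff_exists.mp ((PySem.List.index?_isSome_iff S.reverse so).mpr hrev)
  have hjlt : j < S.length := by
    obtain ⟨hk, _, _⟩ := PySem.List.getElem_of_index?_eq_some hj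
    simpa using hk
  unfold entryFor
  rw [PySem.List.index?_append_of_mem _ hso]
  have h1 : (S ++ [s]).reverse = s :: S.reverse := by simp
  rw [h1, PySem.List.index?_cons_of_ne S.reverse (Ne.symm hne), hj]
  simp only [Option.map_some, Option.getD_some]
  have h2 : ((S ++ [s]).length : Int) - 1 - ((j + 1 : Nat) : Int)
      = ((S.length - 1 - j : Nat) : Int) := by
    simp only [List.length_append, List.length_cons, List.length_nil]
    push_cast [Nat.sub_sub]
    omega
  have h3 : (S.length : Int) - 1 - (j : Int) = ((S.length - 1 - j : Nat) : Int) := by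
    push_cast [Nat.sub_sub]; omega
  rw [h2, h3, PySem.List.pyGet?_natCast, PySem.List.pyGet?_natCast]
  rw [List.getElem?_append_left (by omega)]

theorem entryFor_snoc (S N : List String) (s nm : String) (hlen : S.length = N.length) :
    entryFor (S ++ [s]) (N ++ [nm]) s =
      (s, (((PySem.List.index? (S ++ [s]) s).getD 0 : Nat) : Int), nm) := by
  unfold entryFor
  have h1 : (S ++ [s]).reverse = s :: S.reverse := by simp
  rw [h1, PySem.List.index?_cons_self]
  simp only [Option.getD_some, Nat.cast_zero]
  have h2 : ((S ++ [s]).length : Int) - 1 - 0 = (N.length : Nat) := by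
    simp [hlen]
  rw [h2, PySem.List.pyGet?_natCast]
  simp

theorem alt_eq_entryFor (mappings : List (String × List (String × String))) :
    index_by_sobject_py_alt mappings =
      (PySem.List.dedup (mappings.map soOf)).map
        (entryFor (mappings.map soOf) (mappings.map Prod.fst)) := by
  rfl

-- Characterisation of A's fold: its dict's items are exactly B's staged computation,
-- and the counter is the length of the consumed prefix.
theorem foldA_spec (l : List (String × List (String × String))) :
    (l.foldl stepA_index (PySem.Dict.empty, 0)).2 = (l.length : Int) ∧
    (l.foldl stepA_index (PySem.Dict.empty, 0)).1.items =
      (PySem.List.dedup (l.map soOf)).map (entryFor (l.map soOf) (l.map Prod.fst)) := by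
  induction l using List.reverseRecOn with
  | nil => exact ⟨rfl, rfl⟩
  | append_singleton t p ih =>
    obtain ⟨ihc, ihd⟩ := ih
    set st := t.foldl stepA_index (PySem.Dict.empty, 0) with hst
    set S := t.map soOf with hS
    set N := t.map Prod.fst with hN
    have hlen : S.length = N.length := by simp [hS, hN]
    have hmapS : (t ++ [p]).map soOf = S ++ [soOf p] := by simp [hS]
    have hmapN : (t ++ [p]).map Prod.fst = N ++ [p.1] := by simp [hN]
    have hkeys : st.1.keys = PySem.List.dedup S := by
      simp only [PySem.Dict.keys, ihd, List.map_map]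
      exact (List.map_congr_left fun so _ => rfl).trans (List.map_id _)
    have hnd : st.1.keys.Nodup := hkeys ▸ PySem.List.nodup_dedup S
    have hfold : (t ++ [p]).foldl stepA_index (PySem.Dict.empty, 0) = stepA_index st p := by
      rw [List.foldl_append]; rfl
    rw [hfold, hmapS, hmapN]
    by_cases hs : soOf p ∈ S
    · -- key already present: overwrite in place
      have hmemd : soOf p ∈ PySem.List.dedup S := (PySem.List.mem_dedup _ _).mpr hs
      have hitem : (soOf p, (entryFor S N (soOf p)).2) ∈ st.1.items := by
        rw [ihd]
        exact List.mem_map_of_mem hmemd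
      have hget : st.1.get? (soOf p) = some (entryFor S N (soOf p)).2 :=
        PySem.Dict.get?_of_mem_items st.1 hitem hnd
      have hcont : st.1.contains (soOf p) = true := by
        rw [PySem.Dict.contains_iff_mem_keys, hkeys]; exact hmemd
      have hded : PySem.List.dedup (S ++ [soOf p]) = PySem.List.dedup S := by
        simp only [PySem.List.dedup_eq_ofList, PySem.Set.ofList_append_singleton]
        exact PySem.Set.add_of_mem ((PySem.Set.mem_ofList _ _).mpr hs)
      constructor
      · simp only [stepA_index, hget]; simp [ihc]
      · simp only [stepA_index, hget]
        rw [PySem.Dict.items_insert_of_contains (h := hcont), ihd, List.map_map, hded]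
        apply List.map_congr_left
        intro so hso
        have hsoS : so ∈ S := (PySem.List.mem_dedup _ _).mp hso
        by_cases he : so = soOf p
        · subst he
          simp only [Function.comp_apply]
          rw [if_pos (by simp [entryFor]), entryFor_snoc S N (soOf p) p.1 hlen,
              PySem.List.index?_append_of_mem _ hsoS]
          rfl
        · have hfst : (entryFor S N so).1 = so := rfl
          simp only [Function.comp_apply]
          rw [if_neg (by simp [hfst, he])]
          exact (entryFor_stable S N (soOf p) p.1 so hlen hsoS he).symm
    · -- fresh key: append
      have hcont : st.1.contains (soOf p) = false := by
        rw [← Bool.not_eq_true, PySem.Dict.contains_iff_mem_keys, hkeys]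
        exact fun h => hs ((PySem.List.mem_dedup _ _).mp h)
      have hget : st.1.get? (soOf p) = none := by
        rw [PySem.Dict.get?_eq_none_iff_contains]; exact hcont
      have hded : PySem.List.dedup (S ++ [soOf p]) = PySem.List.dedup S ++ [soOf p] := by
        simp only [PySem.List.dedup_eq_ofList, PySem.Set.ofList_append_singleton]
        exact PySem.Set.add_of_not_mem (fun h => hs ((PySem.Set.mem_ofList _ _).mp h))
      constructor
      · simp only [stepA_index, hget]; simp [ihc]
      · simp only [stepA_index, hget]
        rw [PySem.Dict.items_insert_of_not_contains (h := hcont), ihd, hded, List.map_append]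
        congr 1
        · apply List.map_congr_left
          intro so hso
          have hsoS : so ∈ S := (PySem.List.mem_dedup _ _).mp hso
          have hne : so ≠ soOf p := fun he => hs (he ▸ hsoS)
          exact (entryFor_stable S N (soOf p) p.1 so hlen hsoS hne).symm
        · simp only [List.map_cons, List.map_nil]
          rw [entryFor_snoc S N (soOf p) p.1 hlen]
          rw [PySem.List.index?_append_singleton_self S _ hs, ihc]
          simp [hS]

-- ===== VERDICT (by name: the statement is the Claim_ definition above) =====
theorem index_by_sobject_py_spec : Claim_equal_index_by_sobject_py := by
  intro mappings _ _
  show index_by_sobject_py mappings = index_by_sobject_py_alt mappings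
  rw [alt_eq_entryFor]
  exact (foldA_spec mappings).2
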